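-- pv_equiv track=rewrite | github.com/GoldenKerwin/CodeFuse-CGM | run_pipeline.py | _largest_weakly_connected_nodes
-- ===== SOURCE A (Python) =====
-- from collections import defaultdict, deque
--
-- def _largest_weakly_connected_nodes(nodes: list[str], undirected_adj: dict[str, set[str]]) -> list[str]:
--     node_set = set(nodes)
--     seen = set()
--     best: list[str] = []
--     for n in nodes:
--         if n in seen:
--             continue
--         comp = []
--         q = deque([n])
--         seen.add(n)
--         while q:
--             cur = q.popleft()
--             comp.append(cur)
--             for nb in undirected_adj.get(cur, set()):
--                 if nb in node_set and nb not in seen: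
--                     seen.add(nb)
--                     q.append(nb)
--         if len(comp) > len(best):
--             best = comp
--     best_set = set(best)
--     return [n for n in nodes if n in best_set]
-- ===== SOURCE B (Python) =====
-- def _largest_weakly_connected_nodes(nodes: list[str], undirected_adj: dict[str, set[str]]) -> list[str]:
--     # Two staged passes instead of A's interleaved BFS with a shared 'seen' set:
--     # for each unassigned seed compute its FULL forward-closure (saturation to a
--     # fixpoint with set operations, no queue), then peel off already-assigned
--     # nodes; correct because closures are successor-closed, so the peeled set
--     # equals A's component.
--     node_set = set(nodes)
--     assigned: set[str] = set()
--     best: set[str] = set()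
--     for n in nodes:
--         if n in assigned:
--             continue
--         r = {n}
--         changed = True
--         while changed:
--             changed = False
--             for u in list(r):
--                 for nb in undirected_adj.get(u, set()):
--                     if nb in node_set and nb not in r:
--                         r.add(nb)
--                         changed = True
--         comp = r - assigned
--         assigned |= comp
--         if len(comp) > len(best):
--             best = comp
--     return [n for n in nodes if n in best]
-- ===== Notes on version B (the rewrite author's own statement) =====
-- stated objective: alternative
-- what changed: B replaces A's one-pass BFS threading a shared 'seen' set through a queue by a two-stage scheme: for each still-unassigned seed it computes the seed's FULL forward closure by fixpoint saturation over sets (sweep until no change, no queue and no seen-set), then obtains the component by subtracting the already-assigned nodes; this is correct because closures are successor-closed, so full-closure-minus-earlier-components equals A's restricted BFS component.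
import Mathlib
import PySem

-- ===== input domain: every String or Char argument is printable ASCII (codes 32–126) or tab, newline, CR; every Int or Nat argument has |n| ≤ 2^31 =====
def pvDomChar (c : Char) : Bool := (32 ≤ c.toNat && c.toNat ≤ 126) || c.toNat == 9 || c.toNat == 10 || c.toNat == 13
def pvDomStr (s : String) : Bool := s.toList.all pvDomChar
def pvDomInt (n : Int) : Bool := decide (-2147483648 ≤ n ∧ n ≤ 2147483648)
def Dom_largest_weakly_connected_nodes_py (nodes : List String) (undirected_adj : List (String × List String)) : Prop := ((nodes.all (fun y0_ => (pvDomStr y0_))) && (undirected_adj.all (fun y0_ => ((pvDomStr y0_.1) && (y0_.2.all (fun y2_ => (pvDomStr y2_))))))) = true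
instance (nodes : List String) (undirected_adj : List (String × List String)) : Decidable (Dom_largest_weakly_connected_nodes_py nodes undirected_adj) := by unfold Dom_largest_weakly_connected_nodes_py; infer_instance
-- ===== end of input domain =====

-- B replaces A's BFS with a shared seen-set by a staged algorithm: per seed a full
-- forward-closure computed by fixpoint saturation over sets, then set-subtraction of the
-- already-assigned nodes; equal because closures are successor-closed.

-- ===== PORT A =====
-- undirected_adj.get(cur, set()): the dict parameter is an association list, first-match lookup
def pvNbrs (adj : List (String × List String)) (cur : String) : List String :=
  (PySem.Dict.mk adj).getD cur []

-- A's inner 'while q:' loop (deque: popleft from the front, append at the back); fuel bounds the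
-- iteration count, the callers pass nodes.length + 1, proven sufficient in the lemmas below
def pvRunBFS (adj : List (String × List String)) (nodeSet : PySem.Set String) :
    Nat → List String → List String → PySem.Set String → List String × PySem.Set String
  | 0, _, comp, seen => (comp, seen)
  | fuel + 1, q, comp, seen =>
    match q with
    | [] => (comp, seen)
    | cur :: rest =>
      let comp' := comp ++ [cur]
      let st := (pvNbrs adj cur).foldl
        (fun (st : List String × PySem.Set String) nb =>
          if PySem.Set.contains nodeSet nb && !(PySem.Set.contains st.2 nb) then
            (st.1 ++ [nb], PySem.Set.add st.2 nb)
          else st) (rest, seen)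
      pvRunBFS adj nodeSet fuel st.1 comp' st.2

-- A's outer 'for n in nodes:' loop carrying (seen, best)
def pvOuterA (adj : List (String × List String)) (nodeSet : PySem.Set String) (fuel : Nat) :
    List String → PySem.Set String → List String → List String
  | [], _, best => best
  | n :: ns, seen, best =>
    if PySem.Set.contains seen n then pvOuterA adj nodeSet fuel ns seen best
    else
      let st := pvRunBFS adj nodeSet fuel [n] [] (PySem.Set.add seen n)
      pvOuterA adj nodeSet fuel ns st.2 (if best.length < st.1.length then st.1 else best)

def largest_weakly_connected_nodes_py (nodes : List String) (undirected_adj : List (String × List String)) : List String :=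
  let nodeSet := PySem.Set.ofList nodes
  let best := pvOuterA undirected_adj nodeSet (nodes.length + 1) nodes PySem.Set.empty []
  let bestSet := PySem.Set.ofList best
  nodes.filter (fun n => PySem.Set.contains bestSet n)

-- ===== PORT B =====
-- B's innermost 'for nb in undirected_adj.get(u, set()):' body, on the state (r, changed)
def pvSatStep (nodeSet : PySem.Set String) (st : PySem.Set String × Bool) (nb : String) :
    PySem.Set String × Bool :=
  if PySem.Set.contains nodeSet nb && !(PySem.Set.contains st.1 nb) then
    (PySem.Set.add st.1 nb, true)
  else st

-- B's 'for u in list(r):' sweep body (the snapshot list(r) is the fold's list argument; the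
-- Python iterates the set r in hash order, sound here because the saturated set is order-independent)
def pvSatInner (adj : List (String × List String)) (nodeSet : PySem.Set String)
    (st : PySem.Set String × Bool) (u : String) : PySem.Set String × Bool :=
  (pvNbrs adj u).foldl (pvSatStep nodeSet) st

-- B's 'while changed:' saturation loop; fuel bounds the number of sweeps, the caller passes
-- nodes.length + 1, proven sufficient below (each sweep that sets 'changed' grows r)
def pvSaturate (adj : List (String × List String)) (nodeSet : PySem.Set String) :
    Nat → PySem.Set String → PySem.Set String
  | 0, r => r
  | fuel + 1, r =>
    let st := r.foldl (pvSatInner adj nodeSet) (r, false)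
    if st.2 then pvSaturate adj nodeSet fuel st.1 else st.1

-- B's outer 'for n in nodes:' loop carrying (assigned, best)
def pvOuterB (adj : List (String × List String)) (nodeSet : PySem.Set String) (fuel : Nat) :
    List String → PySem.Set String → PySem.Set String → PySem.Set String
  | [], _, best => best
  | n :: ns, assigned, best =>
    if PySem.Set.contains assigned n then pvOuterB adj nodeSet fuel ns assigned best
    else
      let r := pvSaturate adj nodeSet fuel (PySem.Set.ofList [n])
      let comp := PySem.Set.diff r assigned
      pvOuterB adj nodeSet fuel ns (PySem.Set.update assigned comp)
        (if best.length < comp.length then comp else best)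

def largest_weakly_connected_nodes_py_alt (nodes : List String) (undirected_adj : List (String × List String)) : List String :=
  let nodeSet := PySem.Set.ofList nodes
  let best := pvOuterB undirected_adj nodeSet (nodes.length + 1) nodes PySem.Set.empty PySem.Set.empty
  nodes.filter (fun n => PySem.Set.contains best n)

-- ===== PRECONDITION & SPEC =====
def Spec_largest_weakly_connected_nodes_py (nodes : List String) (undirected_adj : List (String × List String)) (out : List String) : Prop := out = largest_weakly_connected_nodes_py_alt nodes undirected_adj
instance (nodes : List String) (undirected_adj : List (String × List String)) (out : List String) : Decidable (Spec_largest_weakly_connected_nodes_py nodes undirected_adj out) := by unfold Spec_largest_weakly_connected_nodes_py; infer_instance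

-- ===== CLAIM (what is proved, stated in full; the proofs are below) =====
def Claim_equal_largest_weakly_connected_nodes_py : Prop := ∀ (nodes : List String) (undirected_adj : List (String × List String)), Dom_largest_weakly_connected_nodes_py nodes undirected_adj → Spec_largest_weakly_connected_nodes_py nodes undirected_adj (largest_weakly_connected_nodes_py nodes undirected_adj)

-- ===== LEMMAS AND PROOFS =====

-- nodes reachable from n along edges into nodeSet, avoiding the already-seen predicate 'old'
inductive pvReach (nbrs : String → List String) (nodeSet : List String) (old : String → Prop) (n : String) : String → Prop
  | base : pvReach nbrs nodeSet old n n
  | step {u v : String} : pvReach nbrs nodeSet old n u → v ∈ nbrs u → v ∈ nodeSet → ¬ old v →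
      pvReach nbrs nodeSet old n v

def pvUnseen (nodeSet : List String) (seen : PySem.Set String) : Nat :=
  (nodeSet.filter (fun x => !(PySem.Set.contains seen x))).length

lemma pvUnseen_add (nodeSet : List String) (hns : nodeSet.Nodup) (nb : String)
    (seen : PySem.Set String) (h1 : nb ∈ nodeSet) (h2 : nb ∉ seen) :
    pvUnseen nodeSet (PySem.Set.add seen nb) + 1 = pvUnseen nodeSet seen := by
  unfold pvUnseen
  induction nodeSet with
  | nil => simp at h1
  | cons a t ih =>
    rcases List.nodup_cons.mp hns with ⟨ha, hnt⟩
    rcases List.mem_cons.mp h1 with heq | hmem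
    · subst heq
      have hfil : t.filter (fun x => !(PySem.Set.contains (PySem.Set.add seen nb) x)) =
             t.filter (fun x => !(PySem.Set.contains seen x)) := by
        apply List.filter_congr
        intro x hx
        have hxa : x ≠ nb := fun h => ha (h ▸ hx)
        simp [PySem.Set.mem_add, hxa]
      rw [List.filter_cons, List.filter_cons, hfil]
      have e1 : (!(PySem.Set.contains (PySem.Set.add seen nb) nb)) = false := by
        simp [PySem.Set.mem_add]
      have e2 : (!(PySem.Set.contains seen nb)) = true := by simp; exact h2
      rw [e1, e2]; simp
    · have IH := ih hnt hmem
      rw [List.filter_cons, List.filter_cons]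
      have hanb : a ≠ nb := fun h => ha (h ▸ hmem)
      have e3 : (!(PySem.Set.contains (PySem.Set.add seen nb) a)) = (!(PySem.Set.contains seen a)) := by
        simp [PySem.Set.mem_add, hanb]
      rw [e3]
      by_cases hs : a ∈ seen
      · have e4 : (!(PySem.Set.contains seen a)) = false := by
          simp; exact hs
        rw [e4]; simp only [Bool.false_eq_true, if_false]; exact IH
      · have e4 : (!(PySem.Set.contains seen a)) = true := by
          simp; exact hs
        rw [e4]; simp only [if_true, List.length_cons]; omega

-- the neighbour loop of A's inner BFS loop (worklist appended at the back)
def pvStep (nodeSet : List String) (push : List String → String → List String) :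
    (List String × PySem.Set String) → String → (List String × PySem.Set String) :=
  fun st nb =>
    if PySem.Set.contains nodeSet nb && !(PySem.Set.contains st.2 nb) then
      (push st.1 nb, PySem.Set.add st.2 nb)
    else st

lemma pvFold_spec (nodeSet : List String) (hns : nodeSet.Nodup)
    (push : List String → String → List String)
    (hmem : ∀ q x y, y ∈ push q x ↔ y ∈ q ∨ y = x)
    (hlen : ∀ q x, (push q x).length = q.length + 1)
    (hnd : ∀ (pref q : List String) (x : String), x ∉ pref ++ q → (pref ++ q).Nodup →
      (pref ++ push q x).Nodup)
    (lst : List String) :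
    ∀ (q : List String) (seen : PySem.Set String) (pref : List String),
    (∀ x ∈ pref ++ q, x ∈ seen) → (pref ++ q).Nodup →
    (∀ x, x ∈ (lst.foldl (pvStep nodeSet push) (q, seen)).2 ↔ x ∈ seen ∨ (x ∈ lst ∧ x ∈ nodeSet)) ∧
    (∀ x, x ∈ (lst.foldl (pvStep nodeSet push) (q, seen)).1 ↔ x ∈ q ∨ (x ∈ lst ∧ x ∈ nodeSet ∧ x ∉ seen)) ∧
    (∀ x ∈ pref ++ (lst.foldl (pvStep nodeSet push) (q, seen)).1,
      x ∈ (lst.foldl (pvStep nodeSet push) (q, seen)).2) ∧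
    (pref ++ (lst.foldl (pvStep nodeSet push) (q, seen)).1).Nodup ∧
    ((lst.foldl (pvStep nodeSet push) (q, seen)).1.length
        + pvUnseen nodeSet (lst.foldl (pvStep nodeSet push) (q, seen)).2
      ≤ q.length + pvUnseen nodeSet seen) := by
  induction lst with
  | nil =>
    intro q seen pref hin hndq
    refine ⟨by simp, by simp, ?_, hndq, le_refl _⟩
    simpa using hin
  | cons nb tl ih =>
    intro q seen pref hin hndq
    by_cases hacc : (PySem.Set.contains nodeSet nb && !(PySem.Set.contains seen nb)) = true
    · have hnb1 : nb ∈ nodeSet := by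
        have := (Bool.and_eq_true _ _).mp hacc
        simpa [PySem.Set.contains_iff] using this.1
      have hnb2 : nb ∉ seen := by
        have := (Bool.and_eq_true _ _).mp hacc
        simpa [PySem.Set.contains_iff] using this.2
      have hstep : pvStep nodeSet push (q, seen) nb = (push q nb, PySem.Set.add seen nb) := by
        unfold pvStep; dsimp only; rw [if_pos hacc]
      rw [List.foldl_cons, hstep]
      have hnbq : nb ∉ pref ++ q := fun h => hnb2 (hin nb h)
      have hin' : ∀ x ∈ pref ++ push q nb, x ∈ PySem.Set.add seen nb := by
        intro x hx
        rcases List.mem_append.mp hx with h | h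
        · exact (PySem.Set.mem_add _ _ _).mpr (Or.inl (hin x (List.mem_append.mpr (Or.inl h))))
        · rcases (hmem q nb x).mp h with h | rfl
          · exact (PySem.Set.mem_add _ _ _).mpr (Or.inl (hin x (List.mem_append.mpr (Or.inr h))))
          · exact (PySem.Set.mem_add _ _ _).mpr (Or.inr rfl)
      have hnd' : (pref ++ push q nb).Nodup := hnd pref q nb hnbq hndq
      obtain ⟨A, B, C, D, E⟩ := ih (push q nb) (PySem.Set.add seen nb) pref hin' hnd'
      refine ⟨?_, ?_, C, D, ?_⟩
      · intro x
        rw [A x, PySem.Set.mem_add]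
        constructor
        · rintro (h | h) <;> [skip; exact Or.inr ⟨List.mem_cons_of_mem _ h.1, h.2⟩]
          rcases h with h | rfl
          · exact Or.inl h
          · exact Or.inr ⟨List.mem_cons_self, hnb1⟩
        · rintro (h | ⟨h1, h2⟩)
          · exact Or.inl (Or.inl h)
          · rcases List.mem_cons.mp h1 with rfl | h1
            · exact Or.inl (Or.inr rfl)
            · exact Or.inr ⟨h1, h2⟩
      · intro x
        rw [B x, hmem q nb x, PySem.Set.mem_add]
        constructor
        · rintro ((h | rfl) | ⟨h1, h2, h3⟩)
          · exact Or.inl h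
          · exact Or.inr ⟨List.mem_cons_self, hnb1, hnb2⟩
          · have hxnb : x ≠ nb := fun hx => h3 (Or.inr hx)
            exact Or.inr ⟨List.mem_cons_of_mem _ h1, h2, fun hx => h3 (Or.inl hx)⟩
        · rintro (h | ⟨h1, h2, h3⟩)
          · exact Or.inl (Or.inl h)
          · rcases List.mem_cons.mp h1 with rfl | h1
            · exact Or.inl (Or.inr rfl)
            · by_cases hxnb : x = nb
              · exact Or.inl (Or.inr hxnb)
              · exact Or.inr ⟨h1, h2, fun hx => (by rcases hx with hx | hx; exact h3 hx; exact hxnb hx)⟩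
      · have := pvUnseen_add nodeSet hns nb seen hnb1 hnb2
        rw [hlen q nb] at E
        omega
    · have hstep : pvStep nodeSet push (q, seen) nb = (q, seen) := by
        simp only [pvStep]
        rw [if_neg (by simpa using hacc)]
      rw [List.foldl_cons, hstep]
      have hfact : nb ∈ nodeSet → nb ∈ seen := by
        intro h
        by_contra hcon
        apply hacc
        simp [h, hcon]
      obtain ⟨A, B, C, D, E⟩ := ih q seen pref hin hndq
      refine ⟨?_, ?_, C, D, E⟩
      · intro x
        rw [A x]
        constructor
        · rintro (h | ⟨h1, h2⟩)
          · exact Or.inl h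
          · exact Or.inr ⟨List.mem_cons_of_mem _ h1, h2⟩
        · rintro (h | ⟨h1, h2⟩)
          · exact Or.inl h
          · rcases List.mem_cons.mp h1 with rfl | h1
            · exact Or.inl (hfact h2)
            · exact Or.inr ⟨h1, h2⟩
      · intro x
        rw [B x]
        constructor
        · rintro (h | ⟨h1, h2, h3⟩)
          · exact Or.inl h
          · exact Or.inr ⟨List.mem_cons_of_mem _ h1, h2, h3⟩
        · rintro (h | ⟨h1, h2, h3⟩)
          · exact Or.inl h
          · rcases List.mem_cons.mp h1 with rfl | h1
            · exact absurd (hfact h2) h3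
            · exact Or.inr ⟨h1, h2, h3⟩

-- invariant proof for A's inner worklist loop
lemma pvRunGen_spec (adj : List (String × List String)) (nodeSet : List String)
    (hns : nodeSet.Nodup) (old : String → Prop) (P : String → Prop)
    (hstep : ∀ u v, P u → v ∈ pvNbrs adj u → v ∈ nodeSet → ¬ old v → P v)
    (push : List String → String → List String)
    (hmem : ∀ q x y, y ∈ push q x ↔ y ∈ q ∨ y = x)
    (hlen : ∀ q x, (push q x).length = q.length + 1)
    (hnd : ∀ (pref q : List String) (x : String), x ∉ pref ++ q → (pref ++ q).Nodup →
      (pref ++ push q x).Nodup)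
    (run : Nat → List String → List String → PySem.Set String → List String × PySem.Set String)
    (hrun0 : ∀ q comp seen, run 0 q comp seen = (comp, seen))
    (hrunNil : ∀ fuel comp seen, run (fuel + 1) [] comp seen = (comp, seen))
    (hrunCons : ∀ fuel cur rest comp seen,
      run (fuel + 1) (cur :: rest) comp seen =
        run fuel ((pvNbrs adj cur).foldl (pvStep nodeSet push) (rest, seen)).1 (comp ++ [cur])
          ((pvNbrs adj cur).foldl (pvStep nodeSet push) (rest, seen)).2) :
    ∀ (fuel : Nat) (q comp : List String) (seen : PySem.Set String),
    q.length + pvUnseen nodeSet seen ≤ fuel →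
    (∀ x, x ∈ seen ↔ old x ∨ x ∈ comp ∨ x ∈ q) →
    (comp ++ q).Nodup →
    (∀ x ∈ comp ++ q, P x ∧ ¬ old x) →
    (∀ u ∈ comp, ∀ v, v ∈ pvNbrs adj u → v ∈ nodeSet → v ∈ seen) →
    (∀ x, x ∈ (run fuel q comp seen).2 ↔ old x ∨ x ∈ (run fuel q comp seen).1) ∧
    (run fuel q comp seen).1.Nodup ∧
    (∀ x ∈ (run fuel q comp seen).1, P x ∧ ¬ old x) ∧
    (∀ u ∈ (run fuel q comp seen).1, ∀ v, v ∈ pvNbrs adj u → v ∈ nodeSet →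
      v ∈ (run fuel q comp seen).2) ∧
    (∀ x ∈ seen, x ∈ (run fuel q comp seen).2) := by
  intro fuel
  induction fuel with
  | zero =>
    intro q comp seen hfuel hI1 hndq hP hcl
    have hq : q = [] := List.eq_nil_of_length_eq_zero (by omega)
    subst hq
    rw [hrun0]
    refine ⟨?_, by simpa using hndq, ?_, hcl, fun x hx => hx⟩
    · intro x; rw [hI1 x]; simp
    · intro x hx; exact hP x (by simpa using hx)
  | succ fuel ih =>
    intro q comp seen hfuel hI1 hndq hP hcl
    rcases q with _ | ⟨cur, rest⟩
    · rw [hrunNil]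
      refine ⟨?_, by simpa using hndq, ?_, hcl, fun x hx => hx⟩
      · intro x; rw [hI1 x]; simp
      · intro x hx; exact hP x (by simpa using hx)
    · rw [hrunCons]
      have hin : ∀ x ∈ (comp ++ [cur]) ++ rest, x ∈ seen := by
        intro x hx
        rw [hI1 x]
        simp only [List.mem_append, List.mem_singleton] at hx
        rcases hx with (h | rfl) | h
        · exact Or.inr (Or.inl h)
        · exact Or.inr (Or.inr (List.mem_cons_self))
        · exact Or.inr (Or.inr (List.mem_cons_of_mem _ h))
      have hndq' : ((comp ++ [cur]) ++ rest).Nodup := by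
        rw [List.append_assoc]; simpa using hndq
      obtain ⟨A, B, C, D, E⟩ :=
        pvFold_spec nodeSet hns push hmem hlen hnd (pvNbrs adj cur) rest seen (comp ++ [cur]) hin hndq'
      have hPcur : P cur ∧ ¬ old cur := hP cur (by simp)
      have hseensub : ∀ x ∈ seen, x ∈ ((pvNbrs adj cur).foldl (pvStep nodeSet push) (rest, seen)).2 := by
        intro x hx; rw [A x]; exact Or.inl hx
      have holdsub : ∀ x, old x → x ∈ seen := fun x hx => (hI1 x).mpr (Or.inl hx)
      have hI1' : ∀ x, x ∈ ((pvNbrs adj cur).foldl (pvStep nodeSet push) (rest, seen)).2 ↔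
          old x ∨ x ∈ comp ++ [cur] ∨ x ∈ ((pvNbrs adj cur).foldl (pvStep nodeSet push) (rest, seen)).1 := by
        intro x
        have hA := A x; have hB := B x; have h1 := hI1 x
        constructor
        · intro hx
          rcases hA.mp hx with hx | ⟨hx1, hx2⟩
          · rcases h1.mp hx with h | h | h
            · exact Or.inl h
            · exact Or.inr (Or.inl (by simp [h]))
            · rcases List.mem_cons.mp h with rfl | h
              · exact Or.inr (Or.inl (by simp))
              · exact Or.inr (Or.inr (hB.mpr (Or.inl h)))
          · by_cases hxs : x ∈ seen
            · rcases h1.mp hxs with h | h | h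
              · exact Or.inl h
              · exact Or.inr (Or.inl (by simp [h]))
              · rcases List.mem_cons.mp h with rfl | h
                · exact Or.inr (Or.inl (by simp))
                · exact Or.inr (Or.inr (hB.mpr (Or.inl h)))
            · exact Or.inr (Or.inr (hB.mpr (Or.inr ⟨hx1, hx2, hxs⟩)))
        · intro hx
          rcases hx with h | h | h
          · exact hseensub x (holdsub x h)
          · simp only [List.mem_append, List.mem_singleton] at h
            rcases h with h | rfl
            · exact hseensub x (h1.mpr (Or.inr (Or.inl h)))
            · exact hseensub x (h1.mpr (Or.inr (Or.inr List.mem_cons_self)))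
          · rcases hB.mp h with h | ⟨h1', h2', h3'⟩
            · exact hseensub x (h1.mpr (Or.inr (Or.inr (List.mem_cons_of_mem _ h))))
            · exact hA.mpr (Or.inr ⟨h1', h2'⟩)
      have hP' : ∀ x ∈ (comp ++ [cur]) ++ ((pvNbrs adj cur).foldl (pvStep nodeSet push) (rest, seen)).1,
          P x ∧ ¬ old x := by
        intro x hx
        rcases List.mem_append.mp hx with hx | hx
        · simp only [List.mem_append, List.mem_singleton] at hx
          rcases hx with h | rfl
          · exact hP x (List.mem_append.mpr (Or.inl h))
          · exact hPcur
        · rcases (B x).mp hx with h | ⟨h1', h2', h3'⟩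
          · exact hP x (by simp [List.mem_cons_of_mem _ h])
          · exact ⟨hstep cur x hPcur.1 h1' h2' (fun hc => h3' (holdsub x hc)),
              fun hc => h3' (holdsub x hc)⟩
      have hcl' : ∀ u ∈ comp ++ [cur], ∀ v, v ∈ pvNbrs adj u → v ∈ nodeSet →
          v ∈ ((pvNbrs adj cur).foldl (pvStep nodeSet push) (rest, seen)).2 := by
        intro u hu v hv1 hv2
        simp only [List.mem_append, List.mem_singleton] at hu
        rcases hu with h | rfl
        · exact hseensub v (hcl u h v hv1 hv2)
        · rw [A v]; exact Or.inr ⟨hv1, hv2⟩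
      simp only [List.length_cons] at hfuel
      obtain ⟨A', B', C', D', E'⟩ := ih ((pvNbrs adj cur).foldl (pvStep nodeSet push) (rest, seen)).1
        (comp ++ [cur]) ((pvNbrs adj cur).foldl (pvStep nodeSet push) (rest, seen)).2
        (by omega) hI1' D hP' hcl'
      exact ⟨A', B', C', D', fun x hx => E' x (hseensub x hx)⟩

-- a finished BFS run: component = the reachable set; also closure of the final seen set
lemma pvRunBFS_char (adj : List (String × List String)) (nodeSet : List String)
    (hns : nodeSet.Nodup) (old : String → Prop) (n : String) (seen0 : PySem.Set String)
    (hold : ¬ old n) (hseen0 : ∀ x, x ∈ seen0 ↔ old x ∨ x = n)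
    (fuel : Nat) (hfuel : nodeSet.length + 1 ≤ fuel) :
    (pvRunBFS adj nodeSet fuel [n] [] seen0).1.Nodup ∧
    (∀ x, x ∈ (pvRunBFS adj nodeSet fuel [n] [] seen0).1 ↔ pvReach (pvNbrs adj) nodeSet old n x) ∧
    (∀ x, x ∈ (pvRunBFS adj nodeSet fuel [n] [] seen0).2 ↔
      old x ∨ x ∈ (pvRunBFS adj nodeSet fuel [n] [] seen0).1) ∧
    (∀ u ∈ (pvRunBFS adj nodeSet fuel [n] [] seen0).1, ∀ v, v ∈ pvNbrs adj u → v ∈ nodeSet →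
      v ∈ (pvRunBFS adj nodeSet fuel [n] [] seen0).2) := by
  have hspec := pvRunGen_spec adj nodeSet hns old (pvReach (pvNbrs adj) nodeSet old n)
    (fun u v hu h1 h2 h3 => pvReach.step hu h1 h2 h3)
    (fun q x => q ++ [x])
    (by intro q x y; simp)
    (by intro q x; simp)
    (by
      intro pref q x hx hndq
      rw [← List.append_assoc]
      refine (List.nodup_append).mpr ⟨hndq, List.nodup_singleton x, ?_⟩
      intro a ha b hb
      simp only [List.mem_singleton] at hb
      subst hb
      exact fun he => hx (he ▸ ha))
    (pvRunBFS adj nodeSet)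
    (fun q comp seen => rfl) (fun fuel comp seen => rfl)
    (fun fuel cur rest comp seen => rfl)
  have hfuel' : [n].length + pvUnseen nodeSet seen0 ≤ fuel := by
    have : pvUnseen nodeSet seen0 ≤ nodeSet.length := List.length_filter_le _ _
    simp only [List.length_singleton]
    omega
  have hI1 : ∀ x, x ∈ seen0 ↔ old x ∨ x ∈ ([] : List String) ∨ x ∈ [n] := by
    intro x; rw [hseen0 x]; simp
  have hP : ∀ x ∈ ([] : List String) ++ [n], pvReach (pvNbrs adj) nodeSet old n x ∧ ¬ old x := by
    intro x hx
    simp only [List.nil_append, List.mem_singleton] at hx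
    subst hx
    exact ⟨pvReach.base, hold⟩
  obtain ⟨A, B, C, D, E⟩ := hspec fuel [n] [] seen0 hfuel' hI1 (by simp) hP (by simp)
  refine ⟨B, ?_, A, D⟩
  intro x
  constructor
  · exact fun hx => (C x hx).1
  · intro hx
    induction hx with
    | base =>
      have hn2 : n ∈ (pvRunBFS adj nodeSet fuel [n] [] seen0).2 := E n ((hseen0 n).mpr (Or.inr rfl))
      rcases (A n).mp hn2 with h | h
      · exact absurd h hold
      · exact h
    | step hu hv1 hv2 hv3 ihx =>
      rename_i u v
      have hv : v ∈ (pvRunBFS adj nodeSet fuel [n] [] seen0).2 := D u ihx v hv1 hv2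
      rcases (A v).mp hv with h | h
      · exact absurd h hv3
      · exact h

-- B-side: the innermost fold over one node's neighbour list
lemma pvSatFold_spec (nodeSet : PySem.Set String) (lst : List String) :
    ∀ (s : PySem.Set String) (c : Bool),
    (∀ x, x ∈ (lst.foldl (pvSatStep nodeSet) (s, c)).1 ↔ x ∈ s ∨ (x ∈ lst ∧ x ∈ nodeSet)) ∧
    ((lst.foldl (pvSatStep nodeSet) (s, c)).2 = true ↔ c = true ∨ ∃ x ∈ lst, x ∈ nodeSet ∧ x ∉ s) ∧
    (s.Nodup → (lst.foldl (pvSatStep nodeSet) (s, c)).1.Nodup) ∧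
    (s <+: (lst.foldl (pvSatStep nodeSet) (s, c)).1) := by
  induction lst with
  | nil =>
    intro s c
    refine ⟨by simp, by simp, fun h => h, List.prefix_refl s⟩
  | cons nb tl ih =>
    intro s c
    by_cases hacc : (PySem.Set.contains nodeSet nb && !(PySem.Set.contains s nb)) = true
    · have hnb1 : nb ∈ nodeSet := by
        have := (Bool.and_eq_true _ _).mp hacc
        simpa [PySem.Set.contains_iff] using this.1
      have hnb2 : nb ∉ s := by
        have := (Bool.and_eq_true _ _).mp hacc
        simpa [PySem.Set.contains_iff] using this.2
      have hstep : pvSatStep nodeSet (s, c) nb = (PySem.Set.add s nb, true) := by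
        unfold pvSatStep; dsimp only; rw [if_pos hacc]
      rw [List.foldl_cons, hstep]
      have hadd : PySem.Set.add s nb = s ++ [nb] := PySem.Set.add_of_not_mem hnb2
      obtain ⟨A, B, C, D⟩ := ih (PySem.Set.add s nb) true
      refine ⟨?_, ?_, ?_, ?_⟩
      · intro x
        rw [A x, PySem.Set.mem_add]
        constructor
        · rintro ((h | rfl) | ⟨h1, h2⟩)
          · exact Or.inl h
          · exact Or.inr ⟨List.mem_cons_self, hnb1⟩
          · exact Or.inr ⟨List.mem_cons_of_mem _ h1, h2⟩
        · rintro (h | ⟨h1, h2⟩)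
          · exact Or.inl (Or.inl h)
          · rcases List.mem_cons.mp h1 with rfl | h1
            · exact Or.inl (Or.inr rfl)
            · exact Or.inr ⟨h1, h2⟩
      · rw [B]
        constructor
        · intro _; exact Or.inr ⟨nb, List.mem_cons_self, hnb1, hnb2⟩
        · intro _; exact Or.inl rfl
      · intro hnds
        exact C (PySem.Set.nodup_add _ _ hnds)
      · calc s <+: s ++ [nb] := List.prefix_append s [nb]
          _ = PySem.Set.add s nb := hadd.symm
          _ <+: _ := D
    · have hstep : pvSatStep nodeSet (s, c) nb = (s, c) := by
        unfold pvSatStep; dsimp only; rw [if_neg (by simpa using hacc)]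
      rw [List.foldl_cons, hstep]
      have hfact : nb ∈ nodeSet → nb ∈ s := by
        intro h
        by_contra hcon
        apply hacc
        simp [h, hcon]
      obtain ⟨A, B, C, D⟩ := ih s c
      refine ⟨?_, ?_, C, D⟩
      · intro x
        rw [A x]
        constructor
        · rintro (h | ⟨h1, h2⟩)
          · exact Or.inl h
          · exact Or.inr ⟨List.mem_cons_of_mem _ h1, h2⟩
        · rintro (h | ⟨h1, h2⟩)
          · exact Or.inl h
          · rcases List.mem_cons.mp h1 with rfl | h1
            · exact Or.inl (hfact h2)
            · exact Or.inr ⟨h1, h2⟩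
      · rw [B]
        constructor
        · rintro (h | ⟨x, h1, h2, h3⟩)
          · exact Or.inl h
          · exact Or.inr ⟨x, List.mem_cons_of_mem _ h1, h2, h3⟩
        · rintro (h | ⟨x, h1, h2, h3⟩)
          · exact Or.inl h
          · rcases List.mem_cons.mp h1 with rfl | h1
            · exact absurd (hfact h2) h3
            · exact Or.inr ⟨x, h1, h2, h3⟩

-- B-side: one sweep over the snapshot list 'us'
lemma pvPass_spec (adj : List (String × List String)) (nodeSet : PySem.Set String)
    (us : List String) :
    ∀ (s : PySem.Set String) (c : Bool),
    (∀ x, x ∈ (us.foldl (pvSatInner adj nodeSet) (s, c)).1 ↔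
      x ∈ s ∨ ∃ u ∈ us, x ∈ pvNbrs adj u ∧ x ∈ nodeSet) ∧
    ((us.foldl (pvSatInner adj nodeSet) (s, c)).2 = true ↔
      c = true ∨ ∃ u ∈ us, ∃ x ∈ pvNbrs adj u, x ∈ nodeSet ∧ x ∉ s) ∧
    (s.Nodup → (us.foldl (pvSatInner adj nodeSet) (s, c)).1.Nodup) ∧
    (s <+: (us.foldl (pvSatInner adj nodeSet) (s, c)).1) := by
  induction us with
  | nil =>
    intro s c
    refine ⟨by simp, by simp, fun h => h, List.prefix_refl s⟩
  | cons u tl ih =>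
    intro s c
    rw [List.foldl_cons]
    have hhead := pvSatFold_spec nodeSet (pvNbrs adj u) s c
    obtain ⟨A0, B0, C0, D0⟩ := hhead
    rcases hst : (pvNbrs adj u).foldl (pvSatStep nodeSet) (s, c) with ⟨s', c'⟩
    rw [hst] at A0 B0 C0 D0
    show _ ∧ _ ∧ _ ∧ _
    have hInner : pvSatInner adj nodeSet (s, c) u = (s', c') := by
      unfold pvSatInner; rw [hst]
    rw [hInner]
    obtain ⟨A, B, C, D⟩ := ih s' c'
    refine ⟨?_, ?_, fun h => C (C0 h), List.IsPrefix.trans D0 D⟩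
    · intro x
      rw [A x]
      simp only [A0 x]
      constructor
      · rintro ((h | ⟨h1, h2⟩) | ⟨u', h1, h2, h3⟩)
        · exact Or.inl h
        · exact Or.inr ⟨u, List.mem_cons_self, h1, h2⟩
        · exact Or.inr ⟨u', List.mem_cons_of_mem _ h1, h2, h3⟩
      · rintro (h | ⟨u', h1, h2, h3⟩)
        · exact Or.inl (Or.inl h)
        · rcases List.mem_cons.mp h1 with rfl | h1
          · exact Or.inl (Or.inr ⟨h2, h3⟩)
          · exact Or.inr ⟨u', h1, h2, h3⟩
    · rw [B, B0]
      constructor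
      · rintro ((h | ⟨x, h1, h2, h3⟩) | ⟨u', h1, x, h2, h3, h4⟩)
        · exact Or.inl h
        · exact Or.inr ⟨u, List.mem_cons_self, x, h1, h2, h3⟩
        · exact Or.inr ⟨u', List.mem_cons_of_mem _ h1, x, h2, h3,
            fun hxs => h4 ((A0 x).mpr (Or.inl hxs))⟩
      · rintro (h | ⟨u', h1, x, h2, h3, h4⟩)
        · exact Or.inl (Or.inl h)
        · rcases List.mem_cons.mp h1 with rfl | h1
          · exact Or.inl (Or.inr ⟨x, h2, h3, h4⟩)
          · by_cases hxs' : x ∈ s'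
            · rcases (A0 x).mp hxs' with h | ⟨hh1, hh2⟩
              · exact absurd h h4
              · exact Or.inl (Or.inr ⟨x, hh1, hh2, h4⟩)
            · exact Or.inr ⟨u', h1, x, h2, h3, hxs'⟩

-- B-side: the saturation loop computes a successor-closed superset of r, sound for any
-- step-closed predicate; fuel nodeSet.length + 1 - |r| suffices
lemma pvSaturate_spec (adj : List (String × List String)) (nodeSet : PySem.Set String) :
    ∀ (fuel : Nat) (r : PySem.Set String), r.Nodup → (∀ x ∈ r, x ∈ nodeSet) →
    nodeSet.length + 1 ≤ fuel + r.length →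
    (pvSaturate adj nodeSet fuel r).Nodup ∧
    (∀ x ∈ r, x ∈ pvSaturate adj nodeSet fuel r) ∧
    (∀ x ∈ pvSaturate adj nodeSet fuel r, x ∈ nodeSet) ∧
    (∀ u ∈ pvSaturate adj nodeSet fuel r, ∀ v, v ∈ pvNbrs adj u → v ∈ nodeSet →
      v ∈ pvSaturate adj nodeSet fuel r) ∧
    (∀ (P : String → Prop), (∀ x ∈ r, P x) →
      (∀ u v, P u → v ∈ pvNbrs adj u → v ∈ nodeSet → P v) →
      ∀ x ∈ pvSaturate adj nodeSet fuel r, P x) := by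
  intro fuel
  induction fuel with
  | zero =>
    intro r hrnd hrsub hb
    have hle : r.length ≤ nodeSet.length := (List.subperm_of_subset hrnd hrsub).length_le
    omega
  | succ fuel ih =>
    intro r hrnd hrsub hb
    obtain ⟨A, B, C, D⟩ := pvPass_spec adj nodeSet r r false
    rcases hst : r.foldl (pvSatInner adj nodeSet) (r, false) with ⟨s', c'⟩
    rw [hst] at A B C D
    dsimp only at A B C D
    by_cases hflag : c' = true
    · -- a sweep added something: recurse on the strictly larger set
      have hrw : pvSaturate adj nodeSet (fuel + 1) r = pvSaturate adj nodeSet fuel s' := by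
        conv_lhs => rw [pvSaturate]
        simp only [hst]
        rw [if_pos hflag]
      rw [hrw]
      have hnew : ∃ u ∈ r, ∃ x ∈ pvNbrs adj u, x ∈ nodeSet ∧ x ∉ r := by
        rcases (B.mp hflag) with h | h
        · exact absurd h (by simp)
        · exact h
      obtain ⟨u, hu, x, hx1, hx2, hx3⟩ := hnew
      have hxS : x ∈ s' := (A x).mpr (Or.inr ⟨u, hu, hx1, hx2⟩)
      have hsub' : ∀ y ∈ s', y ∈ nodeSet := by
        intro y hy
        rcases (A y).mp hy with h | ⟨_, _, _, h2⟩
        · exact hrsub y h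
        · exact h2
      have hlen' : r.length + 1 ≤ s'.length := by
        obtain ⟨t, ht⟩ := D
        have hxt : x ∈ t := by
          rw [← ht] at hxS
          rcases List.mem_append.mp hxS with h | h
          · exact absurd h hx3
          · exact h
        have : 1 ≤ t.length := List.length_pos_of_mem hxt
        have := congrArg List.length ht
        simp only [List.length_append] at this
        omega
      obtain ⟨A', B', C', D', E'⟩ := ih s' (C hrnd) hsub' (by omega)
      refine ⟨A', fun y hy => B' y ((A y).mpr (Or.inl hy)), C', D', ?_⟩
      intro P hP0 hPstep
      apply E' P ?_ hPstep
      intro y hy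
      rcases (A y).mp hy with h | ⟨u', h1, h2, h3⟩
      · exact hP0 y h
      · exact hPstep u' y (hP0 u' h1) h2 h3
    · -- no change: r was already closed, the sweep returned the same members
      have hrw : pvSaturate adj nodeSet (fuel + 1) r = s' := by
        conv_lhs => rw [pvSaturate]
        simp only [hst]
        rw [if_neg hflag]
      rw [hrw]
      have hnone : ¬ ∃ u ∈ r, ∃ x ∈ pvNbrs adj u, x ∈ nodeSet ∧ x ∉ r := by
        intro h
        exact hflag (B.mpr (Or.inr h))
      have hEq : ∀ x, x ∈ s' ↔ x ∈ r := by
        intro x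
        rw [A x]
        constructor
        · rintro (h | ⟨u, h1, h2, h3⟩)
          · exact h
          · by_contra hxr
            exact hnone ⟨u, h1, x, h2, h3, hxr⟩
        · exact Or.inl
      refine ⟨C hrnd, fun y hy => (hEq y).mpr hy, fun y hy => hrsub y ((hEq y).mp hy), ?_, ?_⟩
      · intro u hu v hv1 hv2
        apply (hEq v).mpr
        by_contra hvr
        exact hnone ⟨u, (hEq u).mp hu, v, hv1, hv2, hvr⟩
      · intro P hP0 _ y hy
        exact hP0 y ((hEq y).mp hy)

-- the saturated set from seed n is exactly the full (unrestricted) reachable set of n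
lemma pvSaturate_char (adj : List (String × List String)) (nodeSet : PySem.Set String)
    (n : String) (hn : n ∈ nodeSet)
    (fuel : Nat) (hfuel : nodeSet.length + 1 ≤ fuel + 1) :
    (pvSaturate adj nodeSet fuel (PySem.Set.ofList [n])).Nodup ∧
    (∀ x, x ∈ pvSaturate adj nodeSet fuel (PySem.Set.ofList [n]) ↔
      pvReach (pvNbrs adj) nodeSet (fun _ => False) n x) := by
  have hone : PySem.Set.ofList [n] = [n] := PySem.Set.ofList_eq_self_of_nodup _ (List.nodup_singleton n)
  have hsub : ∀ x ∈ PySem.Set.ofList [n], x ∈ nodeSet := by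
    intro x hx
    rw [hone] at hx
    simp only [List.mem_singleton] at hx
    exact hx ▸ hn
  have hlen : (PySem.Set.ofList [n]).length = 1 := by rw [hone]; rfl
  obtain ⟨A, B, C, D, E⟩ := pvSaturate_spec adj nodeSet fuel (PySem.Set.ofList [n])
    (by rw [hone]; exact List.nodup_singleton n) hsub (by omega)
  refine ⟨A, ?_⟩
  intro x
  constructor
  · intro hx
    apply E (pvReach (pvNbrs adj) nodeSet (fun _ => False) n) ?_ ?_ x hx
    · intro y hy
      rw [hone] at hy
      simp only [List.mem_singleton] at hy
      exact hy ▸ pvReach.base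
    · exact fun u v hu h1 h2 => pvReach.step hu h1 h2 (fun h => h)
  · intro hx
    induction hx with
    | base => exact B n (by rw [hone]; exact List.mem_singleton.mpr rfl)
    | step hu hv1 hv2 _ ihx => exact D _ ihx _ hv1 hv2

-- peeling: with 'old' successor-closed and n fresh, reachability avoiding old
-- is exactly full reachability minus old
lemma pvPeel (adj : List (String × List String)) (nodeSet : List String)
    (old : String → Prop)
    (hclosed : ∀ u, old u → ∀ v, v ∈ pvNbrs adj u → v ∈ nodeSet → old v)
    (n : String) (hn : ¬ old n) :
    ∀ x, pvReach (pvNbrs adj) nodeSet old n x ↔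
      (pvReach (pvNbrs adj) nodeSet (fun _ => False) n x ∧ ¬ old x) := by
  intro x
  constructor
  · intro h
    induction h with
    | base => exact ⟨pvReach.base, hn⟩
    | step hu h1 h2 h3 ihx => exact ⟨pvReach.step ihx.1 h1 h2 (fun h => h), h3⟩
  · rintro ⟨h, hx⟩
    have key : ∀ y, pvReach (pvNbrs adj) nodeSet (fun _ => False) n y → ¬ old y →
        pvReach (pvNbrs adj) nodeSet old n y := by
      intro y hy
      induction hy with
      | base => exact fun _ => pvReach.base
      | step hu h1 h2 h3 ihx =>
        rename_i u v
        intro hv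
        have hu' : ¬ old u := fun ho => hv (hclosed u ho v h1 h2)
        exact pvReach.step (ihx hu') h1 h2 hv
    exact key x h hx

-- joint induction over the two outer loops
lemma pvOuter_joint (adj : List (String × List String)) (nodeSet : PySem.Set String)
    (hns : nodeSet.Nodup) (fuel : Nat) (hfuel : nodeSet.length + 1 ≤ fuel) :
    ∀ (rest : List String), (∀ x ∈ rest, x ∈ nodeSet) →
    ∀ (seenA assigned : PySem.Set String) (bestA : List String) (bestB : PySem.Set String),
    (∀ x, x ∈ seenA ↔ x ∈ assigned) →
    (∀ u ∈ seenA, ∀ v, v ∈ pvNbrs adj u → v ∈ nodeSet → v ∈ seenA) →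
    bestA.length = bestB.length →
    (∀ x, x ∈ bestA ↔ x ∈ bestB) →
    (pvOuterA adj nodeSet fuel rest seenA bestA).length =
      (pvOuterB adj nodeSet fuel rest assigned bestB).length ∧
    (∀ x, x ∈ pvOuterA adj nodeSet fuel rest seenA bestA ↔
      x ∈ pvOuterB adj nodeSet fuel rest assigned bestB) := by
  intro rest
  induction rest with
  | nil =>
    intro _ seenA assigned bestA bestB hS hcl hlen hmem
    exact ⟨hlen, hmem⟩
  | cons n ns ih =>
    intro hrest seenA assigned bestA bestB hS hcl hlen hmem
    have hnin : n ∈ nodeSet := hrest n List.mem_cons_self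
    have hrest' : ∀ x ∈ ns, x ∈ nodeSet := fun x hx => hrest x (List.mem_cons_of_mem _ hx)
    by_cases hn : n ∈ seenA
    · have hcA : PySem.Set.contains seenA n = true := (PySem.Set.contains_iff _ _).mpr hn
      have hcB : PySem.Set.contains assigned n = true := (PySem.Set.contains_iff _ _).mpr ((hS n).mp hn)
      rw [pvOuterA, pvOuterB, if_pos hcA, if_pos hcB]
      exact ih hrest' seenA assigned bestA bestB hS hcl hlen hmem
    · have hcA : ¬ (PySem.Set.contains seenA n = true) := fun h => hn ((PySem.Set.contains_iff _ _).mp h)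
      have hcB : ¬ (PySem.Set.contains assigned n = true) :=
        fun h => hn ((hS n).mpr ((PySem.Set.contains_iff _ _).mp h))
      rw [pvOuterA, pvOuterB, if_neg hcA, if_neg hcB]
      -- A's component via the BFS characterisation
      obtain ⟨hndA, hRA, hSA, hDA⟩ := pvRunBFS_char adj nodeSet hns (fun x => x ∈ seenA) n
        (PySem.Set.add seenA n) hn (fun x => PySem.Set.mem_add _ _ _) fuel hfuel
      -- B's component via saturation + peeling
      obtain ⟨hndR, hRB⟩ := pvSaturate_char adj nodeSet n hnin fuel (by omega)
      have hpeel := pvPeel adj nodeSet (fun x => x ∈ seenA) hcl n hn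
      have hcompB : ∀ x, x ∈ PySem.Set.diff (pvSaturate adj nodeSet fuel (PySem.Set.ofList [n])) assigned ↔
          pvReach (pvNbrs adj) nodeSet (fun x => x ∈ seenA) n x := by
        intro x
        rw [PySem.Set.mem_diff, hRB x, hpeel x]
        exact and_congr Iff.rfl (not_congr (hS x)).symm
      have hcompmem : ∀ x, x ∈ (pvRunBFS adj nodeSet fuel [n] [] (PySem.Set.add seenA n)).1 ↔
          x ∈ PySem.Set.diff (pvSaturate adj nodeSet fuel (PySem.Set.ofList [n])) assigned := by
        intro x
        rw [hRA x, hcompB x]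
      have hndB : (PySem.Set.diff (pvSaturate adj nodeSet fuel (PySem.Set.ofList [n])) assigned).Nodup :=
        PySem.Set.nodup_diff _ _ hndR
      have hclen : (pvRunBFS adj nodeSet fuel [n] [] (PySem.Set.add seenA n)).1.length =
          (PySem.Set.diff (pvSaturate adj nodeSet fuel (PySem.Set.ofList [n])) assigned).length :=
        ((List.perm_ext_iff_of_nodup hndA hndB).mpr hcompmem).length_eq
      -- the updated seen/assigned sets agree
      have hS' : ∀ x, x ∈ (pvRunBFS adj nodeSet fuel [n] [] (PySem.Set.add seenA n)).2 ↔
          x ∈ PySem.Set.update assigned (PySem.Set.diff (pvSaturate adj nodeSet fuel (PySem.Set.ofList [n])) assigned) := by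
        intro x
        rw [hSA x, PySem.Set.mem_update, hS x, hcompmem x]
      -- the updated A-side seen set is still successor-closed
      have hcl' : ∀ u ∈ (pvRunBFS adj nodeSet fuel [n] [] (PySem.Set.add seenA n)).2,
          ∀ v, v ∈ pvNbrs adj u → v ∈ nodeSet →
          v ∈ (pvRunBFS adj nodeSet fuel [n] [] (PySem.Set.add seenA n)).2 := by
        intro u hu v hv1 hv2
        rcases (hSA u).mp hu with h | h
        · exact (hSA v).mpr (Or.inl (hcl u h v hv1 hv2))
        · exact hDA u h v hv1 hv2
      -- the two best accumulators stay in sync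
      have hbranch : (if bestA.length < (pvRunBFS adj nodeSet fuel [n] [] (PySem.Set.add seenA n)).1.length
            then (pvRunBFS adj nodeSet fuel [n] [] (PySem.Set.add seenA n)).1 else bestA).length =
          (if bestB.length < (PySem.Set.diff (pvSaturate adj nodeSet fuel (PySem.Set.ofList [n])) assigned).length
            then PySem.Set.diff (pvSaturate adj nodeSet fuel (PySem.Set.ofList [n])) assigned else bestB).length ∧
          (∀ x, x ∈ (if bestA.length < (pvRunBFS adj nodeSet fuel [n] [] (PySem.Set.add seenA n)).1.length
            then (pvRunBFS adj nodeSet fuel [n] [] (PySem.Set.add seenA n)).1 else bestA) ↔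
          x ∈ (if bestB.length < (PySem.Set.diff (pvSaturate adj nodeSet fuel (PySem.Set.ofList [n])) assigned).length
            then PySem.Set.diff (pvSaturate adj nodeSet fuel (PySem.Set.ofList [n])) assigned else bestB)) := by
        rw [hlen, hclen]
        by_cases hc : bestB.length < (PySem.Set.diff (pvSaturate adj nodeSet fuel (PySem.Set.ofList [n])) assigned).length
        · rw [if_pos hc, if_pos hc]
          exact ⟨hclen, hcompmem⟩
        · rw [if_neg hc, if_neg hc]
          exact ⟨hlen, hmem⟩
      exact ih hrest' _ _ _ _ hS' hcl' hbranch.1 hbranch.2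

lemma pvFinal_eq (nodes : List String) (undirected_adj : List (String × List String)) :
    largest_weakly_connected_nodes_py nodes undirected_adj =
    largest_weakly_connected_nodes_py_alt nodes undirected_adj := by
  unfold largest_weakly_connected_nodes_py largest_weakly_connected_nodes_py_alt
  dsimp only
  obtain ⟨hlen, hmem⟩ := pvOuter_joint undirected_adj (PySem.Set.ofList nodes)
    (PySem.Set.nodup_ofList nodes) (nodes.length + 1)
    (by have := PySem.Set.length_ofList_le (xs := nodes); omega)
    nodes (fun x hx => (PySem.Set.mem_ofList _ _).mpr hx)
    PySem.Set.empty PySem.Set.empty [] PySem.Set.empty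
    (fun x => Iff.rfl) (by intro u hu; simp at hu) rfl (fun x => Iff.rfl)
  apply List.filter_congr
  intro x hx
  by_cases h : x ∈ pvOuterB undirected_adj (PySem.Set.ofList nodes) (nodes.length + 1) nodes
      PySem.Set.empty PySem.Set.empty
  · rw [(PySem.Set.contains_iff _ _).mpr h,
      (PySem.Set.contains_iff _ _).mpr ((PySem.Set.mem_ofList _ _).mpr ((hmem x).mpr h))]
  · rw [eq_false_of_ne_true (fun hc => h ((hmem x).mp ((PySem.Set.mem_ofList _ _).mp ((PySem.Set.contains_iff _ _).mp hc)))),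
      eq_false_of_ne_true (fun hc => h ((PySem.Set.contains_iff _ _).mp hc))]

-- ===== VERDICT (by name: the statement is the Claim_ definition above) =====
theorem largest_weakly_connected_nodes_py_spec : Claim_equal_largest_weakly_connected_nodes_py := by
  intro nodes undirected_adj _
  unfold Spec_largest_weakly_connected_nodes_py
  exact pvFinal_eq nodes undirected_adj
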